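-- pv_equiv track=rewrite | github.com/AuReMe/padmet | padmet/sbmlPlugin.py | convert_to_coded_id
-- ===== SOURCE A (Python) =====
-- def convert_to_coded_id(uncoded, _type = None, compart = None):
--     """
--     convert an id to sbml valid format. First add type of id "R" for reaction
--     "M" for compound at the start and the compart at the end.
--     _type+"_"+uncoded+"_"+compart
--     then remplace not allowed char by interger ordinal
--     @param uncoded: the original id to code
--     @param _type: the type of the id (ex: 'R' or 'M')
--     @param _compart: the compartiment of the id (ex: 'c' or 'e')
--     @type uncoded, _type, _compart: str
--     @return: the coded id
--     @rtype: str
--     """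
--     #add type and compart
--     if _type is not None:
--         uncoded = _type+"_"+uncoded
--     if compart is not None:
--         uncoded += "_"+compart
--     #char list that are not allowed in a sbml id
--     charlist = ['-', '|', '/', '(', ')', '\'', '=', '#', '*', '.', ':', '!', '+','[',']',','," "]
--     for c in charlist:
--         #if a banned char in the uncoded id, convert it using the integer ordinal
--         uncoded = uncoded.replace(c, "__" + str(ord(c)) + "__")
--
--     return uncoded
-- ===== SOURCE B (Python) =====
-- _TABLE = {c: "__" + str(ord(c)) + "__" for c in "-|/()'=#*.:!+[], "}
--
-- def convert_to_coded_id(uncoded, _type=None, compart=None):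
--     parts = [p for p in (_type, uncoded, compart) if p is not None]
--     s = "_".join(parts)
--     return "".join(_TABLE.get(c, c) for c in s)
-- ===== Notes on version B (the rewrite author's own statement) =====
-- stated objective: simpler
-- what changed: A runs 17 sequential whole-string replace scans after two None-guarded concatenations; B joins the non-None parts with an underscore separator and then makes a single left-to-right pass, substituting each banned character by its double-underscore-delimited ordinal code looked up in a dict built once.
import Mathlib
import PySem

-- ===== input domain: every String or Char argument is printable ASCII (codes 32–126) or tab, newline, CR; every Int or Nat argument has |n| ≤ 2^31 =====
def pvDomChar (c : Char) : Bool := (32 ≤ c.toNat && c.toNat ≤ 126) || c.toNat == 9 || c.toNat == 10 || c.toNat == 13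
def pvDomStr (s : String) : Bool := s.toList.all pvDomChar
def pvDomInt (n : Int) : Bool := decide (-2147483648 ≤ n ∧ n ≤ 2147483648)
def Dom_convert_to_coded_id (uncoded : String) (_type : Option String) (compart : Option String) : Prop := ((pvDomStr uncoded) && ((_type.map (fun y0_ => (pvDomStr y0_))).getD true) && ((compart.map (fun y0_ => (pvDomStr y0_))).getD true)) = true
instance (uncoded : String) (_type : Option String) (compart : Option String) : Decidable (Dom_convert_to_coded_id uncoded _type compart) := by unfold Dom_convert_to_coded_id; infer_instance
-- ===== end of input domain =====

-- B replaces A's 17 sequential whole-string .replace scans by a "_".join of the non-None parts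
-- followed by ONE left-to-right pass that looks each character up in a precomputed char→code dict
-- (objective: simpler).

-- ===== PORT A =====
def pvCharlist : List Char := ['-','|','/','(',')','\'','=','#','*','.',':','!','+','[',']',',',' ']

-- "__" + str(ord(c)) + "__", as A computes it for each banned character c
def pvCode (c : Char) : List Char := '_' :: '_' :: PySem.Int.toChars (c.toNat : Int) ++ ['_','_']

def convert_to_coded_id (uncoded : String) (_type : Option String) (compart : Option String) : String :=
  let u1 : List Char := match _type with
    | some t => t.toList ++ '_' :: uncoded.toList
    | none => uncoded.toList
  let u2 : List Char := match compart with
    | some cp => u1 ++ '_' :: cp.toList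
    | none => u1
  String.ofList (pvCharlist.foldl (fun s c => PySem.Chars.replace s [c] (pvCode c)) u2)

-- ===== PORT B =====
-- the dict comprehension _TABLE = {c: "__"+str(ord(c))+"__" for c in "-|/()'=#*.:!+[], "}
def pvTable : PySem.Dict Char (List Char) :=
  ("-|/()'=#*.:!+[], ".toList).foldl
    (fun d c => d.insert c ('_' :: '_' :: PySem.Int.toChars (c.toNat : Int) ++ ['_','_']))
    PySem.Dict.empty

def convert_to_coded_id_alt (uncoded : String) (_type : Option String) (compart : Option String) : String :=
  let parts : List (List Char) := ([_type, some uncoded, compart].filterMap id).map String.toList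
  let s : List Char := PySem.Chars.join ['_'] parts
  String.ofList (s.flatMap (fun c => (pvTable.get? c).getD [c]))

-- ===== PRECONDITION & SPEC =====
def Spec_convert_to_coded_id (uncoded : String) (_type : Option String) (compart : Option String) (out : String) : Prop := out = convert_to_coded_id_alt uncoded _type compart
instance (uncoded : String) (_type : Option String) (compart : Option String) (out : String) : Decidable (Spec_convert_to_coded_id uncoded _type compart out) := by unfold Spec_convert_to_coded_id; infer_instance

-- ===== CLAIM =====
def Claim_equal_convert_to_coded_id : Prop := ∀ (uncoded : String) (_type : Option String) (compart : Option String), Dom_convert_to_coded_id uncoded _type compart → Spec_convert_to_coded_id uncoded _type compart (convert_to_coded_id uncoded _type compart)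

-- ===== LEMMAS AND PROOFS =====

-- the inner loop of PySem.Chars.replace for a single-character pattern, characterised
theorem go_single (c : Char) (r : List Char) :
    ∀ (l : List Char) (fuel : Nat) (acc : List Char), l.length ≤ fuel →
      PySem.Chars.replace.go [c] r fuel l acc
        = acc.reverse ++ l.flatMap (fun x => if x = c then r else [x]) := by
  intro l
  induction l with
  | nil => intro fuel acc h; cases fuel <;> simp [PySem.Chars.replace.go]
  | cons x t ih =>
    intro fuel acc h
    simp only [List.length_cons] at h
    cases fuel with
    | zero => omega
    | succ f =>
      rw [PySem.Chars.replace.go]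
      by_cases hx : x = c
      · subst hx
        simp only [List.isPrefixOf, BEq.rfl, Bool.true_and, if_pos,
          List.length_cons, List.drop_succ_cons, List.length_nil, List.drop_zero]
        rw [ih f (r.reverse ++ acc) (by omega)]
        simp
      · have hpre : [c].isPrefixOf (x :: t) = false := by
          simp [List.isPrefixOf]
          exact fun hcx => hx hcx.symm
        rw [if_neg (by simp [hpre])]
        rw [ih f (x :: acc) (by omega)]
        simp [hx]

-- replacing a single character is a character-wise flatMap
theorem replace_single (c : Char) (r l : List Char) :
    PySem.Chars.replace l [c] r = l.flatMap (fun x => if x = c then r else [x]) := by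
  rw [PySem.Chars.replace]
  simp only [List.isEmpty_cons, if_neg Bool.false_ne_true]
  exact go_single c r l l.length [] (le_refl _)

-- what A has produced after replacing all characters of P: each char in P is encoded, others kept
def pvEnc (P : List Char) (x : Char) : List Char := if x ∈ P then pvCode x else [x]

-- the emitted codes "__NN__" for banned characters never contain a banned character
theorem code_no_banned :
    (pvCharlist.all fun c => pvCharlist.all fun x => !(pvCode x).contains c) = true := by decide

theorem flatMap_of_no_occ (c : Char) (r : List Char) :
    ∀ (m : List Char), c ∉ m → m.flatMap (fun x => if x = c then r else [x]) = m := by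
  intro m
  induction m with
  | nil => simp
  | cons y t ih =>
    intro hm
    simp only [List.mem_cons, not_or] at hm
    rw [List.flatMap_cons, if_neg (fun h => hm.1 h.symm), ih hm.2]
    rfl

-- one replace step extends the encoded-set by c
theorem step_lemma (c : Char) (P : List Char) (hc : c ∈ pvCharlist) (hP : ∀ y ∈ P, y ∈ pvCharlist) :
    ∀ (l : List Char),
      PySem.Chars.replace (l.flatMap (pvEnc P)) [c] (pvCode c) = l.flatMap (pvEnc (P ++ [c])) := by
  intro l
  rw [replace_single, List.flatMap_assoc]
  apply List.flatMap_congr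
  intro x _
  by_cases hxP : x ∈ P
  · have hxc : x ∈ pvCharlist := hP x hxP
    have hno : c ∉ pvCode x := by
      have := code_no_banned
      simp only [List.all_eq_true, Bool.not_eq_true', List.contains_eq_mem,
        decide_eq_false_iff_not] at this
      exact this c hc x hxc
    simp only [pvEnc, if_pos hxP, if_pos (List.mem_append_left _ hxP)]
    exact flatMap_of_no_occ c (pvCode c) (pvCode x) hno
  · by_cases hxc : x = c
    · subst hxc
      simp [pvEnc, hxP]
    · simp [pvEnc, hxP, hxc]

-- the fold over the remaining characters finishes the encoding
theorem fold_inv :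
    ∀ (Q P : List Char), P ++ Q = pvCharlist →
      ∀ (l : List Char),
        Q.foldl (fun s c => PySem.Chars.replace s [c] (pvCode c)) (l.flatMap (pvEnc P))
          = l.flatMap (pvEnc pvCharlist) := by
  intro Q
  induction Q with
  | nil => intro P h l; rw [List.append_nil] at h; rw [h]; rfl
  | cons c Q' ih =>
    intro P h l
    have hc : c ∈ pvCharlist := by rw [← h]; simp
    have hP : ∀ y ∈ P, y ∈ pvCharlist := by
      intro y hy; rw [← h]; exact List.mem_append_left _ hy
    simp only [List.foldl_cons]
    rw [step_lemma c P hc hP l]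
    exact ih (P ++ [c]) (by simpa using h) l

theorem fold_eq_flatMap (l : List Char) :
    pvCharlist.foldl (fun s c => PySem.Chars.replace s [c] (pvCode c)) l
      = l.flatMap (pvEnc pvCharlist) := by
  have h0 : l.flatMap (pvEnc ([] : List Char)) = l := by
    unfold pvEnc; simp
  calc pvCharlist.foldl (fun s c => PySem.Chars.replace s [c] (pvCode c)) l
      = pvCharlist.foldl (fun s c => PySem.Chars.replace s [c] (pvCode c))
          (l.flatMap (pvEnc ([] : List Char))) := by rw [h0]
    _ = l.flatMap (pvEnc pvCharlist) := fold_inv pvCharlist [] rfl l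

-- B's table lookup computes exactly A's per-character encoding
theorem table_getD (c : Char) : (pvTable.get? c).getD [c] = pvEnc pvCharlist c := by
  by_cases hc : c ∈ pvCharlist
  · fin_cases hc <;> decide
  · have hkeys : pvTable.keys = pvCharlist := by decide
    have hn : pvTable.get? c = none := by
      rw [PySem.Dict.get?_eq_none_iff_not_mem_keys, hkeys]; exact hc
    rw [hn, pvEnc, if_neg hc]; rfl

-- B's join of the non-None parts is A's two guarded concatenations
theorem join_eq_prefix (uncoded : String) (_type : Option String) (compart : Option String) :
    PySem.Chars.join ['_'] (([_type, some uncoded, compart].filterMap id).map String.toList)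
      = (match compart with
          | some cp => (match _type with
              | some t => t.toList ++ '_' :: uncoded.toList
              | none => uncoded.toList) ++ '_' :: cp.toList
          | none => match _type with
              | some t => t.toList ++ '_' :: uncoded.toList
              | none => uncoded.toList) := by
  cases _type <;> cases compart <;>
    simp [PySem.Chars.join_cons_cons, PySem.Chars.join_singleton]

-- ===== VERDICT =====
theorem convert_to_coded_id_spec : Claim_equal_convert_to_coded_id := by
  intro uncoded _type compart _
  unfold Spec_convert_to_coded_id convert_to_coded_id convert_to_coded_id_alt
  simp only [join_eq_prefix]
  apply congrArg String.ofList
  rw [fold_eq_flatMap]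
  apply List.flatMap_congr
  intro x _
  exact (table_getD x).symm
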